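-- pv_equiv track=rewrite | github.com/diegopereira7/VeraTrans | tools/shadow_report.py | _match_decisions
-- ===== SOURCE A (Python) =====
-- from collections import Counter, defaultdict
--
-- def _match_decisions(propuestas: list[dict],
--                      decisiones: list[dict]) -> list[dict]:
--     """Cruza decisiones con la última propuesta que compartió synonym_key.
--
--     Cada decisión puede referirse a varias propuestas (el operador marcó
--     una línea concreta, pero la key es compartida). Tomamos la propuesta
--     más reciente ANTERIOR a la decisión. Si no hay, la decisión queda
--     "huérfana" (no hay contexto de propuesta).
--     """
--     # Índice de propuestas por synonym_key en orden cronológico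
--     props_by_key: dict[str, list[dict]] = defaultdict(list)
--     for p in propuestas:
--         k = p.get('synonym_key')
--         if k:
--             props_by_key[k].append(p)
--     for k in props_by_key:
--         props_by_key[k].sort(key=lambda x: x.get('ts', ''))
--
--     matched = []
--     for d in decisiones:
--         k = d.get('synonym_key', '')
--         ts_d = d.get('ts', '')
--         cands = props_by_key.get(k, [])
--         prop = None
--         for p in reversed(cands):
--             if p.get('ts', '') <= ts_d:
--                 prop = p
--                 break
--         matched.append({'decision': d, 'proposal': prop})
--     return matched
-- ===== SOURCE B (Python) =====
-- def _match_decisions(propuestas: list[dict],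
--                      decisiones: list[dict]) -> list[dict]:
--     """Single pass per decision: keep the running best (latest ts <= decision ts,
--     later occurrence wins ties) among proposals sharing the decision's key."""
--     matched = []
--     for d in decisiones:
--         dk = d.get('synonym_key', '')
--         ts_d = d.get('ts', '')
--         best = None
--         for p in propuestas:
--             k = p.get('synonym_key')
--             if k and k == dk:
--                 ts_p = p.get('ts', '')
--                 if ts_p <= ts_d and (best is None or best.get('ts', '') <= ts_p):
--                     best = p
--         matched.append({'decision': d, 'proposal': best})
--     return matched
-- ===== Notes on version B (the rewrite author's own statement) =====
-- stated objective: simpler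
-- what changed: B drops A's per-key defaultdict index and per-key stable sort + reversed scan, and instead keeps a single running best (latest ts <= decision ts, later occurrence wins ties) in one direct pass over the proposals per decision.
import Mathlib
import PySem

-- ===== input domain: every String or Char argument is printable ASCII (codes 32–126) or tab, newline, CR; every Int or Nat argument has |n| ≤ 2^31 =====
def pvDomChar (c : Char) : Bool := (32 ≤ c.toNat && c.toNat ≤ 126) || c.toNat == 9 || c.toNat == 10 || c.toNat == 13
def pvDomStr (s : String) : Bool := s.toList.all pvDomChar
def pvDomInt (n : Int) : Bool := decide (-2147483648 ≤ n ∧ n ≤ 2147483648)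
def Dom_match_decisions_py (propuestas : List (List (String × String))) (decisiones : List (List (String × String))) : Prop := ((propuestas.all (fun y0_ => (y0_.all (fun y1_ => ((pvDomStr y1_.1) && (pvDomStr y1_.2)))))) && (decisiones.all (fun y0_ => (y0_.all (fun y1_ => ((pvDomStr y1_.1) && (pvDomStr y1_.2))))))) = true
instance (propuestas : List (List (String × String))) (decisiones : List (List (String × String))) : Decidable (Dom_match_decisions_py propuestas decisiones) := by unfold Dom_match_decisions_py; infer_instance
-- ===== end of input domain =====

-- B replaces A's per-key index + per-key stable sort + reversed scan with one direct
-- running-best pass over the proposals for each decision (objective: simpler, not faster).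

-- shared dict-lookup primitives (Python's p.get(k) / p.get(k, default) on a dict argument)
def pvGet? (p : List (String × String)) (k : String) : Option String :=
  (PySem.Dict.mk p).get? k

def pvGetD (p : List (String × String)) (k : String) : String :=
  (PySem.Dict.mk p).getD k ""

-- step of A's grouping loop (the body of 'for p in propuestas: …')
def pvIdxStepA (d : PySem.Dict String (List (List (String × String)))) (p : List (String × String)) : PySem.Dict String (List (List (String × String))) :=
  match pvGet? p "synonym_key" with
  | some k => if k ≠ "" then d.modify k [] (· ++ [p]) else d
  | none => d

-- ===== PORT A =====
def match_decisions_py (propuestas : List (List (String × String))) (decisiones : List (List (String × String))) : List (List (String × Option (List (String × String)))) :=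
  -- props_by_key: defaultdict(list); skip proposals whose key is missing or '' (falsy)
  let props_by_key : PySem.Dict String (List (List (String × String))) :=
    propuestas.foldl pvIdxStepA PySem.Dict.empty
  -- for k in props_by_key: props_by_key[k].sort(key=lambda x: x.get('ts', ''))
  let props_sorted : PySem.Dict String (List (List (String × String))) :=
    PySem.Dict.mk (props_by_key.items.map
      (fun q => (q.1, PySem.List.sorted q.2 (fun x => pvGetD x "ts"))))
  decisiones.foldl (fun matched d =>
    let k := pvGetD d "synonym_key"
    let ts_d := pvGetD d "ts"
    let cands := props_sorted.getD k []
    -- for p in reversed(cands): if p.get('ts','') <= ts_d: prop = p; break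
    let prop := cands.reverse.find? (fun p => decide (pvGetD p "ts" ≤ ts_d))
    matched ++ [[("decision", some d), ("proposal", prop)]]) []

-- ===== PORT B =====
def match_decisions_py_alt (propuestas : List (List (String × String))) (decisiones : List (List (String × String))) : List (List (String × Option (List (String × String)))) :=
  decisiones.map (fun d =>
    let dk := pvGetD d "synonym_key"
    let ts_d := pvGetD d "ts"
    let best := propuestas.foldl (fun best p =>
      match pvGet? p "synonym_key" with
      | some k =>
        if k ≠ "" ∧ k = dk then
          if decide (pvGetD p "ts" ≤ ts_d) &&
             (match best with | none => true | some b => decide (pvGetD b "ts" ≤ pvGetD p "ts"))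
          then some p else best
        else best
      | none => best) none
    [("decision", some d), ("proposal", best)])

-- ===== PRECONDITION & SPEC =====
def Spec_match_decisions_py (propuestas : List (List (String × String))) (decisiones : List (List (String × String))) (out : List (List (String × Option (List (String × String))))) : Prop := out = match_decisions_py_alt propuestas decisiones
instance (propuestas : List (List (String × String))) (decisiones : List (List (String × String))) (out : List (List (String × Option (List (String × String))))) : Decidable (Spec_match_decisions_py propuestas decisiones out) := by unfold Spec_match_decisions_py; infer_instance

-- ===== CLAIM (what is proved, stated in full; the proofs are below) =====
def Claim_equal_match_decisions_py : Prop := ∀ (propuestas : List (List (String × String))) (decisiones : List (List (String × String))), Dom_match_decisions_py propuestas decisiones → Spec_match_decisions_py propuestas decisiones (match_decisions_py propuestas decisiones)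

-- ===== LEMMAS AND PROOFS =====

-- proposals that enter the index under key dk
def pvCand (dk : String) (p : List (String × String)) : Bool :=
  match pvGet? p "synonym_key" with
  | some k => k ≠ "" && k == dk
  | none => false

-- the running-best step of B's inner loop (candidate-filtered form)
def pvStep (ts_d : String) (best : Option (List (String × String))) (p : List (String × String)) : Option (List (String × String)) :=
  if decide (pvGetD p "ts" ≤ ts_d) &&
     (match best with | none => true | some b => decide (pvGetD b "ts" ≤ pvGetD p "ts"))
  then some p else best

-- grouping loop of A: what ends up stored under key k is the candidate filter
lemma pv_group (propuestas : List (List (String × String))) (k : String) :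
    ∀ d : PySem.Dict String (List (List (String × String))),
      (propuestas.foldl pvIdxStepA d).getD k []
      = d.getD k [] ++ propuestas.filter (pvCand k) := by
  induction propuestas with
  | nil => intro d; simp
  | cons p ps ih =>
    intro d
    rw [List.foldl_cons, List.filter_cons, ih]
    cases h : pvGet? p "synonym_key" with
    | none =>
      have h1 : pvIdxStepA d p = d := by simp [pvIdxStepA, h]
      have h2 : pvCand k p = false := by simp [pvCand, h]
      rw [h1, h2]; simp
    | some s =>
      by_cases hs : s = ""
      · have h1 : pvIdxStepA d p = d := by simp [pvIdxStepA, h, hs]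
        have h2 : pvCand k p = false := by simp [pvCand, h, hs]
        rw [h1, h2]; simp
      · have h1 : pvIdxStepA d p = d.modify s [] (· ++ [p]) := by simp [pvIdxStepA, h, hs]
        rw [h1]
        by_cases hk : s = k
        · have h2 : pvCand k p = true := by subst hk; simp [pvCand, h, hs]
          rw [h2, PySem.Dict.getD_modify, if_pos hk.symm]
          simp [hk]
        · have h2 : pvCand k p = false := by simp [pvCand, h, hs, hk]
          rw [h2, PySem.Dict.getD_modify, if_neg (fun hh => hk hh.symm)]
          simp

-- lookup in a dict whose values have been rewritten pointwise
lemma pv_mk_map_get? {γ : Type} (f : γ → γ) (l : List (String × γ)) (k : String) :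
    (PySem.Dict.mk (l.map (fun q => (q.1, f q.2)))).get? k = ((PySem.Dict.mk l).get? k).map f := by
  induction l with
  | nil => rfl
  | cons q rest ih =>
    obtain ⟨qk, qv⟩ := q
    rw [List.map_cons, PySem.Dict.get?_mk_cons, PySem.Dict.get?_mk_cons]
    by_cases h : (qk == k) = true
    · simp [h]
    · simp [h, ih]

-- closed forms of the running-best step
lemma pv_step_none (t : String) (x : List (String × String)) :
    pvStep t none x = if pvGetD x "ts" ≤ t then some x else none := by
  by_cases h : pvGetD x "ts" ≤ t <;> simp [pvStep, h]

lemma pv_step_some (t : String) (x b : List (String × String)) :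
    pvStep t (some b) x
      = if pvGetD x "ts" ≤ t ∧ pvGetD b "ts" ≤ pvGetD x "ts" then some x else some b := by
  by_cases h1 : pvGetD x "ts" ≤ t <;> by_cases h2 : pvGetD b "ts" ≤ pvGetD x "ts" <;>
    simp [pvStep, h1, h2]

lemma pv_find_singleton (t : String) (x : List (String × String)) :
    List.find? (fun p => decide (pvGetD p "ts" ≤ t)) [x]
      = if pvGetD x "ts" ≤ t then some x else none := by
  by_cases h : pvGetD x "ts" ≤ t <;> simp [List.find?, h]

-- core: reversed scan of the stable-sorted candidates = running best over the candidates
lemma pv_insert_find (t : String) (x : List (String × String)) :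
    ∀ ys : List (List (String × String)),
      ys.Pairwise (fun a b => pvGetD a "ts" ≤ pvGetD b "ts") →
      (PySem.List.insertBy (fun a b => decide (pvGetD a "ts" < pvGetD b "ts")) x ys).reverse.find?
        (fun p => decide (pvGetD p "ts" ≤ t))
      = pvStep t (ys.reverse.find? (fun p => decide (pvGetD p "ts" ≤ t))) x := by
  intro ys
  induction ys with
  | nil =>
    intro _
    cases hxt : decide (pvGetD x "ts" ≤ t) <;>
      simp [PySem.List.insertBy, pvStep]
  | cons y ys ih =>
    intro hp
    have hy : ∀ b ∈ ys, pvGetD y "ts" ≤ pvGetD b "ts" := (List.pairwise_cons.mp hp).1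
    have hps : ys.Pairwise (fun a b => pvGetD a "ts" ≤ pvGetD b "ts") := (List.pairwise_cons.mp hp).2
    by_cases hlt : pvGetD x "ts" < pvGetD y "ts"
    · -- x goes in front: reversed list is (y :: ys).reverse ++ [x]
      have hins : PySem.List.insertBy (fun a b => decide (pvGetD a "ts" < pvGetD b "ts")) x (y :: ys)
          = x :: y :: ys := by
        simp [PySem.List.insertBy, hlt]
      rw [hins, show (x :: y :: ys).reverse = (y :: ys).reverse ++ [x] by simp,
          List.find?_append]
      cases hb : (y :: ys).reverse.find? (fun p => decide (pvGetD p "ts" ≤ t)) with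
      | some b =>
        have hbmem : b = y ∨ b ∈ ys := by
          have := List.mem_of_find?_eq_some hb
          simpa [or_comm] using this
        have hyb : pvGetD y "ts" ≤ pvGetD b "ts" := by
          rcases hbmem with h | h
          · simp [h]
          · exact hy b h
        rw [Option.some_or, pv_step_some, if_neg]
        rintro ⟨-, h2⟩
        exact absurd (le_trans hyb h2) (not_le.mpr hlt)
      | none =>
        rw [Option.none_or, pv_find_singleton, pv_step_none]
    · -- x is inserted into the tail; y stays first
      have hyx : pvGetD y "ts" ≤ pvGetD x "ts" := not_lt.mp hlt
      have hins : PySem.List.insertBy (fun a b => decide (pvGetD a "ts" < pvGetD b "ts")) x (y :: ys)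
          = y :: PySem.List.insertBy (fun a b => decide (pvGetD a "ts" < pvGetD b "ts")) x ys := by
        simp [PySem.List.insertBy, hlt]
      rw [hins, List.reverse_cons, List.find?_append, ih hps,
          show (y :: ys).reverse = ys.reverse ++ [y] by simp, List.find?_append]
      cases hb : ys.reverse.find? (fun p => decide (pvGetD p "ts" ≤ t)) with
      | some b =>
        rw [Option.some_or, pv_step_some]
        split_ifs <;> simp
      | none =>
        rw [pv_step_none, pv_find_singleton]
        by_cases hxt : pvGetD x "ts" ≤ t <;> by_cases hyt : pvGetD y "ts" ≤ t <;>
          simp [pv_step_some, pv_step_none, hxt, hyt, hyx]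

lemma pv_sorted_find (t : String) (xs : List (List (String × String))) :
    (PySem.List.sorted xs (fun p => pvGetD p "ts")).reverse.find?
      (fun p => decide (pvGetD p "ts" ≤ t))
    = xs.foldl (pvStep t) none := by
  induction xs using List.reverseRecOn with
  | nil => rfl
  | append_singleton xs x ih =>
    have hsorted : PySem.List.sorted (xs ++ [x]) (fun p => pvGetD p "ts")
        = PySem.List.insertBy (fun a b => decide (pvGetD a "ts" < pvGetD b "ts")) x
            (PySem.List.sorted xs (fun p => pvGetD p "ts")) := by
      rw [PySem.List.sorted_eq_foldl_insertBy, PySem.List.sorted_eq_foldl_insertBy,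
          List.foldl_append]
      rfl
    rw [hsorted, List.foldl_append,
        pv_insert_find t x _ (PySem.List.sorted_pairwise xs (fun p => pvGetD p "ts")), ih]
    rfl

-- B's inner loop = running best over the candidate filter
lemma pv_alt_fold (propuestas : List (List (String × String))) (dk ts_d : String) :
    propuestas.foldl (fun best p =>
      match pvGet? p "synonym_key" with
      | some k =>
        if k ≠ "" ∧ k = dk then
          if decide (pvGetD p "ts" ≤ ts_d) &&
             (match best with | none => true | some b => decide (pvGetD b "ts" ≤ pvGetD p "ts"))
          then some p else best
        else best
      | none => best) none
    = (propuestas.filter (pvCand dk)).foldl (pvStep ts_d) none := by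
  have hf : (fun (best : Option (List (String × String))) (p : List (String × String)) =>
      match pvGet? p "synonym_key" with
      | some k =>
        if k ≠ "" ∧ k = dk then
          if decide (pvGetD p "ts" ≤ ts_d) &&
             (match best with | none => true | some b => decide (pvGetD b "ts" ≤ pvGetD p "ts"))
          then some p else best
        else best
      | none => best)
      = (fun best p => if pvCand dk p = true then pvStep ts_d best p else best) := by
    funext best p
    cases h : pvGet? p "synonym_key" with
    | none => simp [pvCand, h]
    | some s =>
      by_cases hs : s = "" <;> by_cases hk : s = dk <;>
        simp [pvCand, pvStep, h, hs, hk]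
  rw [List.foldl_filter, hf]

-- ===== VERDICT (by name: the statement is the Claim_ definition above) =====
theorem match_decisions_py_spec : Claim_equal_match_decisions_py := by
  intro propuestas decisiones _
  unfold Spec_match_decisions_py match_decisions_py match_decisions_py_alt
  rw [PySem.List.foldl_append_singleton_eq_map
        (fun d => [("decision", some d), ("proposal", _)]) decisiones []]
  simp only [List.nil_append]
  apply List.map_congr_left
  intro d _
  have hidx : ∀ k : String,
      (PySem.Dict.mk ((propuestas.foldl pvIdxStepA PySem.Dict.empty).items.map
        (fun q => (q.1, PySem.List.sorted q.2 (fun x => pvGetD x "ts"))))).getD k []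
      = PySem.List.sorted (propuestas.filter (pvCand k)) (fun x => pvGetD x "ts") := by
    intro k
    rw [PySem.Dict.getD_eq_get?_getD,
        pv_mk_map_get? (fun v => PySem.List.sorted v (fun x => pvGetD x "ts"))]
    have hg := pv_group propuestas k PySem.Dict.empty
    simp only [PySem.Dict.getD_empty, List.nil_append] at hg
    rw [PySem.Dict.getD_eq_get?_getD] at hg
    cases hq : ((propuestas.foldl pvIdxStepA PySem.Dict.empty) : PySem.Dict String (List (List (String × String)))).get? k with
    | none =>
      rw [hq] at hg
      simp only [Option.getD_none, Option.map_none] at hg ⊢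
      symm
      rw [PySem.List.sorted_eq_nil_iff, List.filter_eq_nil_iff]
      intro a ha
      simp at hg
      simp [hg a ha]
    | some v => rw [hq] at hg; simp at hg ⊢; rw [hg]
  rw [hidx, pv_sorted_find, pv_alt_fold]
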